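-- pv_equiv track=rewrite | github.com/gyorilab/gilda | benchmarks/bioid_ner_benchmark.py | _get_entity_type
-- ===== SOURCE A (Python) =====
-- from typing import List, Tuple, Set, Dict, Optional, Iterable, Collection
--
-- def _get_entity_type(groundings: Collection[str]) -> str:
--     """Get entity type based on entity groundings of text in corpus."""
--     if any(
--             grounding.startswith('NCBI gene') or grounding.startswith('UP')
--             for grounding in groundings
--     ):
--         return 'Gene'
--     elif any(grounding.startswith('Rfam') for grounding in groundings):
--         return 'miRNA'
--     elif any(
--             grounding.startswith('CHEBI') or grounding.startswith('PubChem')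
--             for grounding in groundings):
--         return 'Small Molecule'
--     elif any(grounding.startswith('GO') for grounding in groundings):
--         return 'Cellular Component'
--     elif any(
--             grounding.startswith('CVCL') or grounding.startswith('CL')
--             for grounding in groundings
--     ):
--         return 'Cell types/Cell lines'
--     elif any(grounding.startswith('UBERON') for grounding in groundings):
--         return 'Tissue/Organ'
--     elif any(
--             grounding.startswith('NCBI taxon') for grounding in groundings):
--         return 'Taxon'
--     else:
--         return 'unknown'
-- ===== SOURCE B (Python) =====
-- _TYPE_TABLE = [
--     (('NCBI gene', 'UP'), 'Gene'),
--     (('Rfam',), 'miRNA'),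
--     (('CHEBI', 'PubChem'), 'Small Molecule'),
--     (('GO',), 'Cellular Component'),
--     (('CVCL', 'CL'), 'Cell types/Cell lines'),
--     (('UBERON',), 'Tissue/Organ'),
--     (('NCBI taxon',), 'Taxon'),
-- ]
--
-- def _get_entity_type(groundings) -> str:
--     best = None
--     for grounding in groundings:
--         idx = next((i for i, (prefixes, _) in enumerate(_TYPE_TABLE)
--                     if grounding.startswith(prefixes)), None)
--         if idx is not None and (best is None or idx < best):
--             best = idx
--     return _TYPE_TABLE[best][1] if best is not None else 'unknown'
-- ===== Notes on version B (the rewrite author's own statement) =====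
-- stated objective: simpler
-- what changed: Replaces seven separate any()-scans over the groundings with a single pass that keeps the minimum priority index of a (prefix-tuple, type) table and looks up the type once at the end.
import Mathlib
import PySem

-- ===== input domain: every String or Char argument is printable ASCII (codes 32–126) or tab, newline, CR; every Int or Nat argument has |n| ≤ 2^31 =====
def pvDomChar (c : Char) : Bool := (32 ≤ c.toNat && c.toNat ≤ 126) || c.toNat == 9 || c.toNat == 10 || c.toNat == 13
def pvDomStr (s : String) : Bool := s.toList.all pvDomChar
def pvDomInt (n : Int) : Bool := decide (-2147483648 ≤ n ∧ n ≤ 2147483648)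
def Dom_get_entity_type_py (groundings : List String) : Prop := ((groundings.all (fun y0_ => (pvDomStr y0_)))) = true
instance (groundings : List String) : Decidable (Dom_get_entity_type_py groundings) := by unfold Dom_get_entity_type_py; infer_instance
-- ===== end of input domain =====

-- B replaces A's seven separate any()-scans by one pass keeping the minimum index into a
-- priority (prefix-list, type) table; objective: simpler (one traversal plus a table lookup).

-- ===== PORT A =====
def get_entity_type_py (groundings : List String) : String :=
  if groundings.any (fun grounding => PySem.Str.startswith grounding "NCBI gene" || PySem.Str.startswith grounding "UP") then "Gene"
  else if groundings.any (fun grounding => PySem.Str.startswith grounding "Rfam") then "miRNA"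
  else if groundings.any (fun grounding => PySem.Str.startswith grounding "CHEBI" || PySem.Str.startswith grounding "PubChem") then "Small Molecule"
  else if groundings.any (fun grounding => PySem.Str.startswith grounding "GO") then "Cellular Component"
  else if groundings.any (fun grounding => PySem.Str.startswith grounding "CVCL" || PySem.Str.startswith grounding "CL") then "Cell types/Cell lines"
  else if groundings.any (fun grounding => PySem.Str.startswith grounding "UBERON") then "Tissue/Organ"
  else if groundings.any (fun grounding => PySem.Str.startswith grounding "NCBI taxon") then "Taxon"
  else "unknown"

-- ===== PORT B =====
def pvTypeTable : List (List String × String) :=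
  [(["NCBI gene", "UP"], "Gene"),
   (["Rfam"], "miRNA"),
   (["CHEBI", "PubChem"], "Small Molecule"),
   (["GO"], "Cellular Component"),
   (["CVCL", "CL"], "Cell types/Cell lines"),
   (["UBERON"], "Tissue/Organ"),
   (["NCBI taxon"], "Taxon")]

-- port of Source B's `next((i for i, (prefixes, _) in enumerate(_TYPE_TABLE) if grounding.startswith(prefixes)), None)`
def pvFirstCat (g : String) : List (List String × String) → Nat → Option Nat
  | [], _ => none
  | e :: rest, i =>
      if e.1.any (fun p => PySem.Str.startswith g p) then some i else pvFirstCat g rest (i + 1)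

def pvCatIdx (g : String) : Option Nat := pvFirstCat g pvTypeTable 0

-- port of Source B's `if idx is not None and (best is None or idx < best): best = idx`
def pvStep (best idx : Option Nat) : Option Nat :=
  match idx with
  | none => best
  | some i =>
      match best with
      | none => some i
      | some b => if i < b then some i else some b

def get_entity_type_py_alt (groundings : List String) : String :=
  match groundings.foldl (fun best g => pvStep best (pvCatIdx g)) none with
  | some i => (pvTypeTable.getD i ([], "unknown")).2  -- best is always a valid index; default unreachable
  | none => "unknown"

-- ===== PRECONDITION & SPEC =====
def Spec_get_entity_type_py (groundings : List String) (out : String) : Prop := out = get_entity_type_py_alt groundings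
instance (groundings : List String) (out : String) : Decidable (Spec_get_entity_type_py groundings out) := by unfold Spec_get_entity_type_py; infer_instance

-- ===== CLAIM (what is proved, stated in full; the proofs are below) =====
def Claim_equal_get_entity_type_py : Prop := ∀ (groundings : List String), Dom_get_entity_type_py groundings → Spec_get_entity_type_py groundings (get_entity_type_py groundings)

-- ===== LEMMAS AND PROOFS =====

-- first-true index of seven priority-ordered booleans
def pvFT (b0 b1 b2 b3 b4 b5 b6 : Bool) : Option Nat :=
  if b0 then some 0 else if b1 then some 1 else if b2 then some 2 else if b3 then some 3
  else if b4 then some 4 else if b5 then some 5 else if b6 then some 6 else none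

lemma pvStep_none_left (b : Option Nat) : pvStep none b = b := by
  cases b <;> rfl

lemma pvStep_none_right (a : Option Nat) : pvStep a none = a := rfl

lemma pvStep_some (a b : Nat) : pvStep (some a) (some b) = some (min a b) := by
  simp only [pvStep]
  split_ifs <;> congr 1 <;> omega

lemma pvStep_assoc (a b c : Option Nat) :
    pvStep (pvStep a b) c = pvStep a (pvStep b c) := by
  rcases a with _ | a <;> rcases b with _ | b <;> rcases c with _ | c <;>
    simp [pvStep_none_left, pvStep_none_right, pvStep_some, Nat.min_assoc]

lemma foldl_pvStep_shift (xs : List String) (a : Option Nat) :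
    xs.foldl (fun best g => pvStep best (pvCatIdx g)) a
      = pvStep a (xs.foldl (fun best g => pvStep best (pvCatIdx g)) none) := by
  induction xs generalizing a with
  | nil => simp [pvStep_none_right]
  | cons x xs ih =>
      simp only [List.foldl_cons, pvStep_none_left]
      rw [ih, ih (pvCatIdx x), pvStep_assoc]

lemma pvCatIdx_eq (g : String) :
    pvCatIdx g =
      pvFT (PySem.Str.startswith g "NCBI gene" || PySem.Str.startswith g "UP")
           (PySem.Str.startswith g "Rfam")
           (PySem.Str.startswith g "CHEBI" || PySem.Str.startswith g "PubChem")
           (PySem.Str.startswith g "GO")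
           (PySem.Str.startswith g "CVCL" || PySem.Str.startswith g "CL")
           (PySem.Str.startswith g "UBERON")
           (PySem.Str.startswith g "NCBI taxon") := by
  simp only [pvCatIdx, pvTypeTable, pvFirstCat, pvFT, List.any_cons, List.any_nil,
    Bool.or_false]

lemma pvStep_pvFT (b0 b1 b2 b3 b4 b5 b6 a0 a1 a2 a3 a4 a5 a6 : Bool) :
    pvStep (pvFT b0 b1 b2 b3 b4 b5 b6) (pvFT a0 a1 a2 a3 a4 a5 a6)
      = pvFT (b0 || a0) (b1 || a1) (b2 || a2) (b3 || a3) (b4 || a4) (b5 || a5) (b6 || a6) := by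
  revert b0 b1 b2 b3 b4 b5 b6 a0 a1 a2 a3 a4 a5 a6
  decide

lemma best_eq (gs : List String) :
    gs.foldl (fun best g => pvStep best (pvCatIdx g)) none
      = pvFT (gs.any (fun grounding => PySem.Str.startswith grounding "NCBI gene" || PySem.Str.startswith grounding "UP"))
             (gs.any (fun grounding => PySem.Str.startswith grounding "Rfam"))
             (gs.any (fun grounding => PySem.Str.startswith grounding "CHEBI" || PySem.Str.startswith grounding "PubChem"))
             (gs.any (fun grounding => PySem.Str.startswith grounding "GO"))
             (gs.any (fun grounding => PySem.Str.startswith grounding "CVCL" || PySem.Str.startswith grounding "CL"))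
             (gs.any (fun grounding => PySem.Str.startswith grounding "UBERON"))
             (gs.any (fun grounding => PySem.Str.startswith grounding "NCBI taxon")) := by
  induction gs with
  | nil => rfl
  | cons x xs ih =>
      simp only [List.foldl_cons, List.any_cons, pvStep_none_left]
      rw [foldl_pvStep_shift, ih, pvCatIdx_eq, pvStep_pvFT]

-- ===== VERDICT (by name: the statement is the Claim_ definition above) =====
theorem get_entity_type_py_spec : Claim_equal_get_entity_type_py := by
  intro gs _
  unfold Spec_get_entity_type_py get_entity_type_py get_entity_type_py_alt
  rw [best_eq]
  generalize (gs.any (fun grounding => PySem.Str.startswith grounding "NCBI gene" || PySem.Str.startswith grounding "UP")) = c0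
  generalize (gs.any (fun grounding => PySem.Str.startswith grounding "Rfam")) = c1
  generalize (gs.any (fun grounding => PySem.Str.startswith grounding "CHEBI" || PySem.Str.startswith grounding "PubChem")) = c2
  generalize (gs.any (fun grounding => PySem.Str.startswith grounding "GO")) = c3
  generalize (gs.any (fun grounding => PySem.Str.startswith grounding "CVCL" || PySem.Str.startswith grounding "CL")) = c4
  generalize (gs.any (fun grounding => PySem.Str.startswith grounding "UBERON")) = c5
  generalize (gs.any (fun grounding => PySem.Str.startswith grounding "NCBI taxon")) = c6
  revert c0 c1 c2 c3 c4 c5 c6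
  decide
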